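-- pv_equiv track=rewrite | github.com/ricardojalv1/past-projets | NLP-Final-Project/data_processing.py | encode_expansions
-- ===== SOURCE A (Python) =====
-- def encode_expansions(acro2exp):
--     """
--     :param acro2exp: dict[str, list[str]]; a dictionary mapping acronyms to their possible expansions.
--     :return: dict[str, int]
--     Encode all expansions into int form. Return the mapping of expansion to its id.
--     """
--     cur_id = 0
--     exp2id = {}
--     for acronym, expansions in acro2exp.items():
--         for exp in expansions:
--             if exp not in exp2id:
--                 exp2id[exp] = cur_id
--                 cur_id += 1
--     return exp2id
-- ===== SOURCE B (Python) =====
-- def encode_expansions(acro2exp):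
--     flat = [exp for expansions in acro2exp.values() for exp in expansions]
--     uniq = sorted(set(flat), key=flat.index)
--     return {exp: i for i, exp in enumerate(uniq)}
-- ===== Notes on version B (the rewrite author's own statement) =====
-- stated objective: alternative
-- what changed: Replaces A's single-pass running counter with inline membership guard by a sort-based algorithm: collect the unordered set of all expansions, sort the distinct expansions by their first-occurrence position (flat.index) in the flattened stream, then assign ids by enumerate; correct because first-occurrence indices are distinct, so the sort deterministically recovers first-occurrence order.
import Mathlib
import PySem

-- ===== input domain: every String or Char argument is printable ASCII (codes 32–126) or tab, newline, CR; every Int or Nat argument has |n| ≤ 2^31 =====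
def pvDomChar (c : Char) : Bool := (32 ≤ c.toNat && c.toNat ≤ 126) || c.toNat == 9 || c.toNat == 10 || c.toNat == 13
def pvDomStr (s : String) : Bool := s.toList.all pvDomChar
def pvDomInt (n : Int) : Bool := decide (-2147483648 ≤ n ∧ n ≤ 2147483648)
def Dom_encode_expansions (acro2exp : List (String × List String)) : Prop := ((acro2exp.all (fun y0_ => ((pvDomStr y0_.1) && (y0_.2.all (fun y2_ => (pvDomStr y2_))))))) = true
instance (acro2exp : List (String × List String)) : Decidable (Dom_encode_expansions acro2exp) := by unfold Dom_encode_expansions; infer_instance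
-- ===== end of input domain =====

-- B replaces A's single-pass counter with an inline membership guard by a sort-based algorithm:
-- sort the set of distinct expansions by first-occurrence position, then enumerate (alternative, same result).

-- ===== PORT A =====
-- nested loops over the dict items, maintaining (cur_id, exp2id)
def encode_expansions (acro2exp : List (String × List String)) : List (String × Int) :=
  let st := acro2exp.foldl
    (fun (st : Int × PySem.Dict String Int) p =>
      p.2.foldl
        (fun st exp =>
          if !st.2.contains exp then (st.1 + 1, st.2.insert exp st.1) else st)
        st)
    (0, PySem.Dict.empty)
  st.2.items

-- ===== PORT B =====
-- flatten; set(flat); sorted by key=flat.index (exact: every element of the set occurs in flat,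
-- so flat.index never raises and the .getD 0 default is never used); then enumerate
def encode_expansions_alt (acro2exp : List (String × List String)) : List (String × Int) :=
  let flat := acro2exp.flatMap (fun p => p.2)
  let uniq := PySem.List.sorted (PySem.Set.ofList flat)
    (fun e => (PySem.List.index? flat e).getD 0) false
  (PySem.List.enumerate uniq 0).map (fun p => (p.2, p.1))

-- ===== PRECONDITION & SPEC =====
def Spec_encode_expansions (acro2exp : List (String × List String)) (out : List (String × Int)) : Prop := out = encode_expansions_alt acro2exp
instance (acro2exp : List (String × List String)) (out : List (String × Int)) : Decidable (Spec_encode_expansions acro2exp out) := by unfold Spec_encode_expansions; infer_instance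

-- ===== CLAIM (what is proved, stated in full; the proofs are below) =====
def Claim_equal_encode_expansions : Prop := ∀ (acro2exp : List (String × List String)), Dom_encode_expansions acro2exp → Spec_encode_expansions acro2exp (encode_expansions acro2exp)

-- ===== LEMMAS AND PROOFS =====

-- the dict A has built after the seen-set is s (in order), with ids 0..|s|-1
def pvDictOf (s : List String) : PySem.Dict String Int :=
  PySem.Dict.mk ((PySem.List.enumerate s 0).map (fun p => (p.2, p.1)))

lemma pvKeys_dictOf (s : List String) : (pvDictOf s).keys = s := by
  simp [pvDictOf, PySem.Dict.keys, List.map_map, Function.comp_def,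
        PySem.List.map_snd_enumerate]

lemma pvStep (s : List String) (exp : String) :
    (if !(pvDictOf s).contains exp
       then ((s.length : Int) + 1, (pvDictOf s).insert exp (s.length : Int))
       else ((s.length : Int), pvDictOf s))
    = (((PySem.Set.add s exp).length : Int), pvDictOf (PySem.Set.add s exp)) := by
  have hc : (pvDictOf s).contains exp = decide (exp ∈ s) := by
    rw [PySem.Dict.contains_eq_decide_mem_keys, pvKeys_dictOf]
  by_cases h : exp ∈ s
  · simp [hc, h]
  · have hadd := PySem.Set.add_of_not_mem (s := s) h
    simp only [hc, h, decide_false, Bool.not_false, if_true, hadd]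
    rw [Prod.ext_iff]
    refine ⟨by simp, ?_⟩
    apply PySem.Dict.ext
    rw [PySem.Dict.items_insert_of_not_contains]
    · simp [pvDictOf, PySem.List.enumerate_append]
    · rw [hc]; simpa using h

lemma pvLoop (ys : List String) : ∀ (s : List String),
    ys.foldl
      (fun st exp =>
        if !(st : Int × PySem.Dict String Int).2.contains exp
          then (st.1 + 1, st.2.insert exp st.1) else st)
      (((s.length : Int)), pvDictOf s)
    = (((PySem.Set.update s ys).length : Int), pvDictOf (PySem.Set.update s ys)) := by
  induction ys with
  | nil => intro s; simp [PySem.Set.update_nil]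
  | cons y t ih =>
    intro s
    rw [List.foldl_cons, pvStep, ih, PySem.Set.update_cons]

lemma pvFlatten (acro2exp : List (String × List String))
    (f : (Int × PySem.Dict String Int) → String → (Int × PySem.Dict String Int)) :
    ∀ (init : Int × PySem.Dict String Int),
    acro2exp.foldl (fun st p => p.2.foldl f st) init
    = (acro2exp.flatMap (fun p => p.2)).foldl f init := by
  induction acro2exp with
  | nil => intro init; simp
  | cons p t ih => intro init; simp [List.foldl_append, ih]

-- first-occurrence positions are strictly increasing along set(xs)'s insertion order
lemma pvPairwiseIdx (xs : List String) :
    (PySem.Set.ofList xs).Pairwise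
      (fun a b => (PySem.List.index? xs a).getD 0 < (PySem.List.index? xs b).getD 0) := by
  induction xs using List.reverseRecOn with
  | nil => simp [PySem.Set.ofList_nil]
  | append_singleton t x ih =>
    rw [PySem.Set.ofList_append_singleton]
    by_cases h : x ∈ PySem.Set.ofList t
    · rw [PySem.Set.add_of_mem h]
      refine ih.imp_of_mem ?_
      intro a b ha hb hab
      have ha' : a ∈ t := (PySem.Set.mem_ofList _ _).1 ha
      have hb' : b ∈ t := (PySem.Set.mem_ofList _ _).1 hb
      rwa [PySem.List.index?_append_of_mem _ ha', PySem.List.index?_append_of_mem _ hb']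
    · have hx : x ∉ t := fun hm => h ((PySem.Set.mem_ofList _ _).2 hm)
      rw [PySem.Set.add_of_not_mem h]
      rw [List.pairwise_append]
      refine ⟨?_, by simp, ?_⟩
      · refine ih.imp_of_mem ?_
        intro a b ha hb hab
        have ha' : a ∈ t := (PySem.Set.mem_ofList _ _).1 ha
        have hb' : b ∈ t := (PySem.Set.mem_ofList _ _).1 hb
        rwa [PySem.List.index?_append_of_mem _ ha', PySem.List.index?_append_of_mem _ hb']
      · intro a ha b hb
        have ha' : a ∈ t := (PySem.Set.mem_ofList _ _).1 ha
        have hbx : b = x := by simpa using hb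
        subst hbx
        rw [PySem.List.index?_append_of_mem _ ha',
            PySem.List.index?_append_singleton_self t b hx]
        have := PySem.List.index?_isSome_iff t a
        obtain ⟨k, hk⟩ := Option.isSome_iff_exists.1 (this.2 ha')
        obtain ⟨hkl, -, -⟩ := PySem.List.getElem_of_index?_eq_some hk
        rw [hk]
        simpa using hkl

-- sorting set(flat) by first-occurrence index recovers first-occurrence order
lemma pvSortedOfList (xs : List String) :
    PySem.List.sorted (PySem.Set.ofList xs)
      (fun e => (PySem.List.index? xs e).getD 0) false = PySem.Set.ofList xs :=
  PySem.List.sorted_eq_of_perm_of_pairwise_lt _ _ _ (List.Perm.refl _) (pvPairwiseIdx xs)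

-- ===== VERDICT (by name: the statement is the Claim_ definition above) =====
theorem encode_expansions_spec : Claim_equal_encode_expansions := by
  intro acro2exp _
  unfold Spec_encode_expansions encode_expansions encode_expansions_alt
  rw [pvFlatten]
  have h0 : ((0 : Int), (PySem.Dict.empty : PySem.Dict String Int))
      = ((([] : List String).length : Int), pvDictOf []) := by
    simp [pvDictOf, PySem.Dict.empty, PySem.List.enumerate]
  rw [h0, pvLoop]
  simp only [pvSortedOfList]
  simp [pvDictOf, PySem.Set.update, PySem.Set.ofList_eq_foldl]
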